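-- pv_equiv track=rewrite | github.com/Davmo441/defi-bot | main.py | pair_name
-- ===== SOURCE A (Python) =====
-- STABLES = {"USDC", "USDT", "DAI", "FRAX", "LUSD", "USDE", "SUSDE", "USDS", "GHO", "PYUSD"}
--
-- ETH_ASSETS = {"ETH", "WETH", "STETH", "WSTETH", "RETH", "CBETH"}
--
-- BTC_ASSETS = {"BTC", "WBTC", "CBBTC", "TBTC"}
--
-- def get_tokens(p):
--     symbol = (p.get("symbol") or "").upper()
--     clean = symbol.replace("/", "-").replace("_", "-")
--     return [x.strip() for x in clean.split("-") if x.strip()]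
--
-- def token_category(token):
--     token = token.upper()
--     if token in STABLES:
--         return "stable"
--     if token in ETH_ASSETS:
--         return "eth"
--     if token in BTC_ASSETS:
--         return "btc"
--     return "alt"
--
-- def pair_name(p):
--     tokens = get_tokens(p)
--     if len(tokens) < 2:
--         return "Inconnu"
--
--     cats = [token_category(t) for t in tokens[:2]]
--
--     if cats[0] == "stable" and cats[1] == "stable":
--         return "Stable / Stable"
--     if set(cats) == {"eth", "btc"}:
--         return "ETH / BTC"
--     if "eth" in cats and "stable" in cats:
--         return "ETH / Stable"
--     if "btc" in cats and "stable" in cats: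
--         return "BTC / Stable"
--     if "stable" in cats and "alt" in cats:
--         return "Altcoin / Stable"
--     if cats[0] == "alt" and cats[1] == "alt":
--         return "Altcoin / Altcoin"
--
--     return "Mixte / Autre"
-- ===== SOURCE B (Python) =====
-- STABLES = {"USDC", "USDT", "DAI", "FRAX", "LUSD", "USDE", "SUSDE", "USDS", "GHO", "PYUSD"}
--
-- ETH_ASSETS = {"ETH", "WETH", "STETH", "WSTETH", "RETH", "CBETH"}
--
-- BTC_ASSETS = {"BTC", "WBTC", "CBBTC", "TBTC"}
--
-- # 4x4 name table indexed by category rank (0=stable, 1=eth, 2=btc, 3=alt)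
-- _NAMES = [
--     ["Stable / Stable",  "ETH / Stable",  "BTC / Stable",  "Altcoin / Stable"],
--     ["ETH / Stable",     "Mixte / Autre", "ETH / BTC",     "Mixte / Autre"],
--     ["BTC / Stable",     "ETH / BTC",     "Mixte / Autre", "Mixte / Autre"],
--     ["Altcoin / Stable", "Mixte / Autre", "Mixte / Autre", "Altcoin / Altcoin"],
-- ]
--
-- def _rank(token):
--     t = token.upper()
--     if t in STABLES:
--         return 0
--     if t in ETH_ASSETS:
--         return 1
--     if t in BTC_ASSETS:
--         return 2
--     return 3
--
-- def pair_name(p):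
--     symbol = (p.get("symbol") or "").upper()
--     tokens = [x.strip() for x in symbol.replace("/", "-").replace("_", "-").split("-") if x.strip()]
--     if len(tokens) < 2:
--         return "Inconnu"
--     return _NAMES[_rank(tokens[0])][_rank(tokens[1])]
-- ===== Notes on version B (the rewrite author's own statement) =====
-- stated objective: simpler
-- what changed: Replaced the six-branch if-cascade over category strings (with a set-equality test and membership scans over the cats list) by a numeric category rank (0..3) and a single symmetric 4x4 lookup table indexed by the two ranks.
import Mathlib
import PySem

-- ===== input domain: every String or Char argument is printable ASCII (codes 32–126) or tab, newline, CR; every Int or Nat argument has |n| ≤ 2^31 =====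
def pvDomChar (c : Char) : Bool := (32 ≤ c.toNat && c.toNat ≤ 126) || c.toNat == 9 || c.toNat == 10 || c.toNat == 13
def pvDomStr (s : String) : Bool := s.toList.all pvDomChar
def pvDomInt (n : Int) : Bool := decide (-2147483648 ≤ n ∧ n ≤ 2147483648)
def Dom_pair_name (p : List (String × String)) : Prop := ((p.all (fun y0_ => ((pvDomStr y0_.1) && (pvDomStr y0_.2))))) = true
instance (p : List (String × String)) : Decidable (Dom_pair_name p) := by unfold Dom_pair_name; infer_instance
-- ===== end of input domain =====

-- B replaces the six-branch if-cascade over category strings by a numeric rank (0..3)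
-- and one symmetric 4×4 lookup table indexed by the two ranks (objective: simpler).

-- ===== PORT A =====
def pvSTABLES : PySem.Set String :=
  PySem.Set.ofList ["USDC", "USDT", "DAI", "FRAX", "LUSD", "USDE", "SUSDE", "USDS", "GHO", "PYUSD"]
def pvETH_ASSETS : PySem.Set String :=
  PySem.Set.ofList ["ETH", "WETH", "STETH", "WSTETH", "RETH", "CBETH"]
def pvBTC_ASSETS : PySem.Set String :=
  PySem.Set.ofList ["BTC", "WBTC", "CBBTC", "TBTC"]

def get_tokens (p : List (String × String)) : List String :=
  -- (p.get("symbol") or ""): assoc-list first-match lookup; '' when missing ('' or "" is '' again)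
  let symbol := PySem.Str.upper (((p.find? (fun kv => kv.1 == "symbol")).map Prod.snd).getD "")
  let clean := PySem.Str.replace (PySem.Str.replace symbol "/" "-") "_" "-"
  -- [x.strip() for x in clean.split("-") if x.strip()]; split? is some since "-" ≠ ""
  ((PySem.Str.split? clean "-").getD []).filterMap
    (fun x => if PySem.Str.strip x = "" then none else some (PySem.Str.strip x))

def token_category (token : String) : String :=
  -- Python rebinds token = token.upper(); here upper is applied at each test
  if PySem.Set.contains pvSTABLES (PySem.Str.upper token) then "stable"
  else if PySem.Set.contains pvETH_ASSETS (PySem.Str.upper token) then "eth"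
  else if PySem.Set.contains pvBTC_ASSETS (PySem.Str.upper token) then "btc"
  else "alt"

def pair_name (p : List (String × String)) : String :=
  let tokens := get_tokens p
  if tokens.length < 2 then "Inconnu"
  else
    let cats := (PySem.List.slice tokens none (some 2)).map token_category
    if cats.getD 0 "" = "stable" ∧ cats.getD 1 "" = "stable" then "Stable / Stable"
    else if PySem.Set.equal (PySem.Set.ofList cats) (PySem.Set.ofList ["eth", "btc"]) then "ETH / BTC"
    else if "eth" ∈ cats ∧ "stable" ∈ cats then "ETH / Stable"
    else if "btc" ∈ cats ∧ "stable" ∈ cats then "BTC / Stable"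
    else if "stable" ∈ cats ∧ "alt" ∈ cats then "Altcoin / Stable"
    else if cats.getD 0 "" = "alt" ∧ cats.getD 1 "" = "alt" then "Altcoin / Altcoin"
    else "Mixte / Autre"

-- ===== PORT B =====
def pvNAMES : List (List String) :=
  [["Stable / Stable",  "ETH / Stable",  "BTC / Stable",  "Altcoin / Stable"],
   ["ETH / Stable",     "Mixte / Autre", "ETH / BTC",     "Mixte / Autre"],
   ["BTC / Stable",     "ETH / BTC",     "Mixte / Autre", "Mixte / Autre"],
   ["Altcoin / Stable", "Mixte / Autre", "Mixte / Autre", "Altcoin / Altcoin"]]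

def pvRank (token : String) : Nat :=
  if PySem.Set.contains pvSTABLES (PySem.Str.upper token) then 0
  else if PySem.Set.contains pvETH_ASSETS (PySem.Str.upper token) then 1
  else if PySem.Set.contains pvBTC_ASSETS (PySem.Str.upper token) then 2
  else 3

def pair_name_alt (p : List (String × String)) : String :=
  let symbol := PySem.Str.upper (((p.find? (fun kv => kv.1 == "symbol")).map Prod.snd).getD "")
  let tokens := ((PySem.Str.split?
      (PySem.Str.replace (PySem.Str.replace symbol "/" "-") "_" "-") "-").getD []).filterMap
    (fun x => if PySem.Str.strip x = "" then none else some (PySem.Str.strip x))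
  -- tokens[0], tokens[1]: in range since len(tokens) >= 2
  if tokens.length < 2 then "Inconnu"
  else (pvNAMES.getD (pvRank (tokens.getD 0 "")) []).getD (pvRank (tokens.getD 1 "")) ""

-- ===== PRECONDITION & SPEC =====
def Spec_pair_name (p : List (String × String)) (out : String) : Prop := out = pair_name_alt p
instance (p : List (String × String)) (out : String) : Decidable (Spec_pair_name p out) := by unfold Spec_pair_name; infer_instance

-- ===== CLAIM (what is proved, stated in full; the proofs are below) =====
def Claim_equal_pair_name : Prop := ∀ (p : List (String × String)), Dom_pair_name p → Spec_pair_name p (pair_name p)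

-- ===== LEMMAS AND PROOFS =====

-- each token's category string and its rank come from the same three membership tests
theorem rank_cases (t : String) :
    pvRank t = 0 ∧ token_category t = "stable" ∨
    pvRank t = 1 ∧ token_category t = "eth" ∨
    pvRank t = 2 ∧ token_category t = "btc" ∨
    pvRank t = 3 ∧ token_category t = "alt" := by
  unfold pvRank token_category
  split_ifs <;> simp

theorem slice_two (t0 t1 : String) (rest : List String) :
    PySem.List.slice (t0 :: t1 :: rest) none (some 2) = [t0, t1] := by
  simp [PySem.List.slice]

-- the branch of pair_name taken when at least two tokens exist (proof-only helper)
def pair_name_branch (t0 t1 : String) (rest : List String) : String :=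
  let cats := (PySem.List.slice (t0 :: t1 :: rest) none (some 2)).map token_category
  if cats.getD 0 "" = "stable" ∧ cats.getD 1 "" = "stable" then "Stable / Stable"
  else if PySem.Set.equal (PySem.Set.ofList cats) (PySem.Set.ofList ["eth", "btc"]) then "ETH / BTC"
  else if "eth" ∈ cats ∧ "stable" ∈ cats then "ETH / Stable"
  else if "btc" ∈ cats ∧ "stable" ∈ cats then "BTC / Stable"
  else if "stable" ∈ cats ∧ "alt" ∈ cats then "Altcoin / Stable"
  else if cats.getD 0 "" = "alt" ∧ cats.getD 1 "" = "alt" then "Altcoin / Altcoin"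
  else "Mixte / Autre"

-- the cascade on the two head tokens equals the table lookup at their ranks
theorem dispatch_eq (t0 t1 : String) (rest : List String) :
    pair_name_branch t0 t1 rest = (pvNAMES.getD (pvRank t0) []).getD (pvRank t1) "" := by
  rcases rank_cases t0 with ⟨h0, c0⟩ | ⟨h0, c0⟩ | ⟨h0, c0⟩ | ⟨h0, c0⟩ <;>
    rcases rank_cases t1 with ⟨h1, c1⟩ | ⟨h1, c1⟩ | ⟨h1, c1⟩ | ⟨h1, c1⟩ <;>
      simp [pair_name_branch, slice_two, h0, h1, c0, c1, pvNAMES] <;>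
        first
          | exact ⟨"eth", by decide⟩
          | exact ⟨"btc", by decide⟩
          | exact ⟨"alt", by decide⟩
          | exact fun x => or_comm

-- A's dispatch and B's dispatch as functions of the token list (proof-only helpers)
def pvCascade (tokens : List String) : String :=
  if tokens.length < 2 then "Inconnu"
  else
    let cats := (PySem.List.slice tokens none (some 2)).map token_category
    if cats.getD 0 "" = "stable" ∧ cats.getD 1 "" = "stable" then "Stable / Stable"
    else if PySem.Set.equal (PySem.Set.ofList cats) (PySem.Set.ofList ["eth", "btc"]) then "ETH / BTC"
    else if "eth" ∈ cats ∧ "stable" ∈ cats then "ETH / Stable"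
    else if "btc" ∈ cats ∧ "stable" ∈ cats then "BTC / Stable"
    else if "stable" ∈ cats ∧ "alt" ∈ cats then "Altcoin / Stable"
    else if cats.getD 0 "" = "alt" ∧ cats.getD 1 "" = "alt" then "Altcoin / Altcoin"
    else "Mixte / Autre"

def pvTable (tokens : List String) : String :=
  -- tokens[0], tokens[1]: in range since len(tokens) >= 2
  if tokens.length < 2 then "Inconnu"
  else (pvNAMES.getD (pvRank (tokens.getD 0 "")) []).getD (pvRank (tokens.getD 1 "")) ""

theorem core (ts : List String) : pvCascade ts = pvTable ts := by
  rcases ts with _ | ⟨t0, _ | ⟨t1, rest⟩⟩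
  · rfl
  · rfl
  · have h := dispatch_eq t0 t1 rest
    simpa [pvCascade, pvTable, pair_name_branch] using h

theorem a_eq (p : List (String × String)) : pair_name p = pvCascade (get_tokens p) := rfl

theorem b_eq (p : List (String × String)) : pair_name_alt p = pvTable (get_tokens p) := rfl

-- ===== VERDICT (by name: the statement is the Claim_ definition above) =====
theorem pair_name_spec : Claim_equal_pair_name := by
  intro p _
  show pair_name p = pair_name_alt p
  rw [a_eq, b_eq]
  exact core (get_tokens p)
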